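-- pv_equiv track=rewrite | github.com/djdarcy/Prime-Square-Sum | tests/one-offs/thinking/2026-02-07__tf-closed-form-verification.py | stf_algo
-- ===== SOURCE A (Python) =====
-- import math
--
-- def stf_algo(b):
--     """stf via algorithmic digit-triangle approach"""
--     r = (-1 + int(math.isqrt(1 + 8*b))) // 2
--     digits = list(range(b))
--     idx = 0
--     total = 0
--     for row_size in range(r, 0, -1):
--         row_digits = digits[idx:idx + row_size]
--         idx += row_size
--         val = 0
--         for d in row_digits:
--             val = val * b + d
--         total += val
--     return total
-- ===== SOURCE B (Python) =====
-- import math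
--
-- def stf_algo(b):
--     """stf via per-row closed forms: row value = start*G(s) + T(s), with G,T kept by O(1) recurrences"""
--     r = (int(math.isqrt(1 + 8 * b)) - 1) // 2
--     tri = r * (r + 1) // 2
--     g = 0
--     t = 0
--     total = 0
--     for s in range(1, r + 1):
--         t = b * t + (s - 1)
--         g = b * g + 1
--         total += (tri - s * (s + 1) // 2) * g + t
--     return total
-- ===== Notes on version B (the rewrite author's own statement) =====
-- stated objective: faster
-- what changed: Instead of materialising list(range(b)) and Horner-folding every digit of every row (Theta(b) work), B computes each row's value in O(1) from its start index via per-row closed forms G(s)=(b^s-1)/(b-1) and T(s)=sum j*b^(s-1-j) maintained by O(1) recurrences, looping only over the ~sqrt(2b) row sizes.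
import Mathlib
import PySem

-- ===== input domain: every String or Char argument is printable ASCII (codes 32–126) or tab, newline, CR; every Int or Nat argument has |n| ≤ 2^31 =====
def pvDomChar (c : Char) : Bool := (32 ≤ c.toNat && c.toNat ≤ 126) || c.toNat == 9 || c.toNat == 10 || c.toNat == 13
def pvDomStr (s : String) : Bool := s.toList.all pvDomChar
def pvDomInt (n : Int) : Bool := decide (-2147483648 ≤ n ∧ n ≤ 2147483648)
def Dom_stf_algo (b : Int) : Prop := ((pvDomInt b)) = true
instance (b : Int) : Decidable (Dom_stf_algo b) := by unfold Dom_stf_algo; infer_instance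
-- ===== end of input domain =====

-- B replaces A's digit-by-digit Horner fold over list(range(b)) by per-row closed forms
-- maintained with O(1) recurrences, looping only over the row sizes (objective: faster).


-- ===== PORT A =====
-- math.isqrt(n) is ported by hand as Nat.sqrt n.toNat: exact for n ≥ 0; for n < 0 Python
-- raises ValueError, which Pre_ excludes (1 + 8*b < 0 ⟺ b < 0).
def stf_algo (b : Int) : Int :=
  let r : Int := PySem.Int.floordiv (-1 + ((Nat.sqrt (1 + 8 * b).toNat : Int))) 2
  let digits := PySem.List.pyRange 0 b 1
  let st := (PySem.List.pyRange r 0 (-1)).foldl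
    (fun (st : Int × Int) rowSize =>
      let rowDigits := PySem.List.slice digits (some st.1) (some (st.1 + rowSize))
      let idx := st.1 + rowSize
      let val := rowDigits.foldl (fun v d => v * b + d) 0
      (idx, st.2 + val)) (0, 0)
  st.2

-- ===== PORT B =====
def stf_algo_alt (b : Int) : Int :=
  let r : Int := PySem.Int.floordiv (((Nat.sqrt (1 + 8 * b).toNat : Int)) - 1) 2
  let tri : Int := PySem.Int.floordiv (r * (r + 1)) 2
  let st := (PySem.List.pyRange 1 (r + 1) 1).foldl
    (fun (st : Int × Int × Int) s =>
      let t := b * st.2.1 + (s - 1)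
      let g := b * st.1 + 1
      (g, t, st.2.2 + (tri - PySem.Int.floordiv (s * (s + 1)) 2) * g + t)) (0, 0, 0)
  st.2.2

-- ===== PRECONDITION & SPEC =====
-- Pre_ excludes exactly b < 0, where math.isqrt(1+8*b) raises ValueError in A (and in B).
def Pre_stf_algo (b : Int) : Prop := 0 ≤ b
instance (b : Int) : Decidable (Pre_stf_algo b) := by unfold Pre_stf_algo; infer_instance
def pvWitness_stf_algo : Int := (7)

def Spec_stf_algo (b : Int) (out : Int) : Prop := out = stf_algo_alt b
instance (b : Int) (out : Int) : Decidable (Spec_stf_algo b out) := by unfold Spec_stf_algo; infer_instance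

-- ===== CLAIM (what is proved, stated in full; the proofs are below) =====
def Claim_equal_stf_algo : Prop := ∀ (b : Int), Dom_stf_algo b → Pre_stf_algo b → Spec_stf_algo b (stf_algo b)

-- ===== LEMMAS AND PROOFS =====

-- G(s) = 1 + b + … + b^(s-1)   and   T(s) = Σ_{j<s} j·b^(s-1-j), by their recurrences
def gpow (b : Int) : Nat → Int
  | 0 => 0
  | s + 1 => b * gpow b s + 1

def tvv (b : Int) : Nat → Int
  | 0 => 0
  | s + 1 => b * tvv b s + s

def triN (m : Nat) : Nat := m * (m + 1) / 2

-- Σ_{s=1}^{m} ((c − tri s)·G(s) + T(s))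
def bsum (b c : Int) : Nat → Int
  | 0 => 0
  | m + 1 => bsum b c m + ((c - (triN (m + 1) : Int)) * gpow b (m + 1) + tvv b (m + 1))

theorem triN_succ (m : Nat) : triN (m + 1) = triN m + (m + 1) := by
  unfold triN
  have h : (m + 1) * (m + 1 + 1) = m * (m + 1) + 2 * (m + 1) := by ring
  omega

theorem horner_row (b : Int) : ∀ (s : Nat) (a : Int),
    (PySem.List.pyRange a (a + (s : Int)) 1).foldl (fun v d => v * b + d) 0
      = a * gpow b s + tvv b s := by
  intro s
  induction s with
  | zero => intro a; simp [PySem.List.pyRange_one_eq_nil, gpow, tvv]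
  | succ n ih =>
      intro a
      have hsplit : a + ((n + 1 : Nat) : Int) = (a + (n : Int)) + 1 := by push_cast; ring
      rw [hsplit, PySem.List.pyRange_one_succ_right (by omega), List.foldl_append]
      simp only [List.foldl_cons, List.foldl_nil, ih a, gpow, tvv]
      ring

theorem slice_range (b a c : Int) (h0 : 0 ≤ a) (hac : a ≤ c) (hcb : c ≤ b) :
    PySem.List.slice (PySem.List.pyRange 0 b 1) (some a) (some c)
      = PySem.List.pyRange a c 1 := by
  rw [PySem.List.slice_toNat _ h0 (le_trans h0 hac)]
  rw [PySem.List.pyRange_one_append 0 a b h0 (le_trans hac hcb)]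
  rw [List.drop_left' (by simp [PySem.List.length_pyRange_one])]
  rw [PySem.List.pyRange_one_append a c b hac hcb]
  rw [List.take_left' (by simp [PySem.List.length_pyRange_one]; omega)]

-- invariant of A's row loop
theorem A_loop (b : Int) : ∀ (m : Nat) (idx tot : Int), 0 ≤ idx →
    idx + (triN m : Int) ≤ b →
    (PySem.List.pyRange (m : Int) 0 (-1)).foldl
      (fun (st : Int × Int) rowSize =>
        let rowDigits := PySem.List.slice (PySem.List.pyRange 0 b 1) (some st.1) (some (st.1 + rowSize))
        let idx := st.1 + rowSize
        let val := rowDigits.foldl (fun v d => v * b + d) 0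
        (idx, st.2 + val)) (idx, tot)
      = (idx + (triN m : Int), tot + bsum b (idx + (triN m : Int)) m) := by
  intro m
  induction m with
  | zero =>
      intro idx tot h0 hb
      simp [PySem.List.pyRange_neg_one_eq_nil, triN, bsum]
  | succ n ih =>
      intro idx tot h0 hb
      have htri := triN_succ n
      rw [PySem.List.pyRange_neg_one_cons (by exact_mod_cast Nat.succ_pos n)]
      have hc : ((n + 1 : Nat) : Int) - 1 = (n : Int) := by push_cast; ring
      rw [List.foldl_cons]
      simp only [hc]
      have hslice : PySem.List.slice (PySem.List.pyRange 0 b 1) (some idx)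
          (some (idx + ((n + 1 : Nat) : Int))) = PySem.List.pyRange idx (idx + ((n + 1 : Nat) : Int)) 1 := by
        apply slice_range b idx _ h0 (by push_cast; omega)
        have : (triN (n + 1) : Int) = (triN n : Int) + (n + 1 : Int) := by exact_mod_cast htri
        push_cast at hb ⊢; omega
      simp only [hslice, horner_row b (n + 1) idx]
      rw [ih (idx + ((n + 1 : Nat) : Int)) _ (by push_cast; omega)
        (by have : (triN (n + 1) : Int) = (triN n : Int) + (n + 1 : Int) := by exact_mod_cast htri
            push_cast at hb ⊢; omega)]
      have hC : idx + ((n + 1 : Nat) : Int) + (triN n : Int) = idx + (triN (n + 1) : Int) := by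
        have : (triN (n + 1) : Int) = (triN n : Int) + (n + 1 : Int) := by exact_mod_cast htri
        push_cast at this ⊢; omega
      rw [hC]
      refine Prod.ext rfl ?_
      simp only [bsum]
      ring

-- invariant of B's loop
theorem B_loop (b tri : Int) : ∀ (m : Nat),
    (PySem.List.pyRange 1 ((m : Int) + 1) 1).foldl
      (fun (st : Int × Int × Int) s =>
        let t := b * st.2.1 + (s - 1)
        let g := b * st.1 + 1
        (g, t, st.2.2 + (tri - PySem.Int.floordiv (s * (s + 1)) 2) * g + t)) (0, 0, 0)
      = (gpow b m, tvv b m, bsum b tri m) := by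
  intro m
  induction m with
  | zero => simp [PySem.List.pyRange_one_eq_nil, gpow, tvv, bsum]
  | succ n ih =>
      have hsplit : ((n + 1 : Nat) : Int) + 1 = ((n : Int) + 1) + 1 := by push_cast; ring
      rw [hsplit, PySem.List.pyRange_one_succ_right (by omega), List.foldl_append, ih]
      simp only [List.foldl_cons, List.foldl_nil]
      have hfd : PySem.Int.floordiv (((n : Int) + 1) * (((n : Int) + 1) + 1)) 2 = (triN (n + 1) : Int) := by
        have h1 : ((n : Int) + 1) * (((n : Int) + 1) + 1) = (((n + 1) * (n + 2) : Nat) : Int) := by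
          push_cast; ring
        rw [h1]
        have h2 := PySem.Int.floordiv_natCast ((n + 1) * (n + 2)) 2
        rw [show ((2 : Nat) : Int) = (2 : Int) by norm_num] at h2
        rw [h2]; unfold triN
        have h3 : (n + 1) * (n + 2) = (n+1) * (n + 1 + 1) := by ring
        rw [h3]
      refine Prod.ext ?_ (Prod.ext ?_ ?_)
      · simp [gpow]
      · simp only [tvv]; ring
      · simp only [bsum, hfd, gpow, tvv]; ring

-- the computed r satisfies tri(r) ≤ b
theorem tri_le (b : Int) (hb : 0 ≤ b) :
    ((triN ((Nat.sqrt (1 + 8 * b).toNat - 1) / 2) : Nat) : Int) ≤ b := by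
  set t := Nat.sqrt (1 + 8 * b).toNat with ht
  set rn := (t - 1) / 2 with hrn
  have hsq : t * t ≤ (1 + 8 * b).toNat := by
    simpa [pow_two] using Nat.sqrt_le' (1 + 8 * b).toNat
  have hB : (1 + 8 * b).toNat = 1 + 8 * b.toNat := by omega
  have h1 : 2 * rn + 1 ≤ t ∨ t = 0 := by omega
  have key : triN rn ≤ b.toNat := by
    rcases h1 with h1 | h1
    · have h2 : (2 * rn + 1) * (2 * rn + 1) ≤ t * t := Nat.mul_le_mul h1 h1
      have e1 : (2 * rn + 1) * (2 * rn + 1) = 4 * (rn * rn) + 4 * rn + 1 := by ring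
      have e2 : rn * (rn + 1) = rn * rn + rn := by ring
      unfold triN
      omega
    · have : rn = 0 := by omega
      simp [this, triN]

  omega

theorem r_eq (b : Int) (hb : 0 ≤ b) :
    PySem.Int.floordiv (-1 + ((Nat.sqrt (1 + 8 * b).toNat : Int))) 2
      = (((Nat.sqrt (1 + 8 * b).toNat - 1) / 2 : Nat) : Int) := by
  have ht : 1 ≤ Nat.sqrt (1 + 8 * b).toNat := by
    rw [Nat.le_sqrt]; omega
  have h1 : -1 + ((Nat.sqrt (1 + 8 * b).toNat : Int)) = ((Nat.sqrt (1 + 8 * b).toNat - 1 : Nat) : Int) := by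
    omega
  rw [h1]
  have h2 := PySem.Int.floordiv_natCast (Nat.sqrt (1 + 8 * b).toNat - 1) 2
  rw [show ((2 : Nat) : Int) = (2 : Int) by norm_num] at h2
  exact h2

-- ===== VERDICT (by name: the statement is the Claim_ definition above) =====
theorem stf_algo_spec : Claim_equal_stf_algo := by
  intro b _ hpre
  unfold Spec_stf_algo stf_algo stf_algo_alt
  have hpre' : (0 : Int) ≤ b := hpre
  set rn : Nat := (Nat.sqrt (1 + 8 * b).toNat - 1) / 2 with hrn
  have hr : PySem.Int.floordiv (-1 + ((Nat.sqrt (1 + 8 * b).toNat : Int))) 2 = (rn : Int) :=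
    r_eq b hpre'
  have hr' : PySem.Int.floordiv (((Nat.sqrt (1 + 8 * b).toNat : Int)) - 1) 2 = (rn : Int) := by
    rw [show ((Nat.sqrt (1 + 8 * b).toNat : Int)) - 1 = -1 + ((Nat.sqrt (1 + 8 * b).toNat : Int)) by ring]
    exact hr
  simp only [hr, hr']
  have htri : PySem.Int.floordiv ((rn : Int) * ((rn : Int) + 1)) 2 = (triN rn : Int) := by
    have h1 : (rn : Int) * ((rn : Int) + 1) = ((rn * (rn + 1) : Nat) : Int) := by push_cast; ring
    rw [h1]
    have h2 := PySem.Int.floordiv_natCast (rn * (rn + 1)) 2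
    rw [show ((2 : Nat) : Int) = (2 : Int) by norm_num] at h2
    rw [h2]; unfold triN; norm_cast
  simp only [htri]
  have hA := A_loop b rn 0 0 (le_refl 0) (by have := tri_le b hpre'; rw [← hrn] at this; omega)
  have hB := B_loop b ((triN rn : Nat) : Int) rn
  rw [hA, hB]
  simp
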